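-- pv_equiv track=rewrite | github.com/EduBrainBoost/SSID-open-core | 12_tooling/cli/evidence_standardizer.py | _detect_tool_from_paths
-- ===== SOURCE A (Python) =====
-- from typing import Dict, List, Optional, Any, Union, Tuple
--
-- def _detect_tool_from_paths(changed_paths: List[str]) -> Optional[str]:
--     """Detect tool used from paths and patterns"""
--     # Simple heuristics - could be enhanced
--     if any("claude" in p.lower() for p in changed_paths):
--         return "claude"
--     elif any("codex" in p.lower() or "gpt" in p.lower() for p in changed_paths):
--         return "codex"
--     elif any("gemini" in p.lower() for p in changed_paths):
--         return "gemini"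
--     elif any("opencode" in p.lower() for p in changed_paths):
--         return "opencode"
--     return None
-- ===== SOURCE B (Python) =====
-- def _detect_tool_from_paths(changed_paths):
--     """Detect tool used from paths and patterns"""
--     # One pass: lowercase each path once, record which keywords occur anywhere.
--     found = set()
--     for p in changed_paths:
--         low = p.lower()
--         for kw in ("claude", "codex", "gpt", "gemini", "opencode"):
--             if kw in low:
--                 found.add(kw)
--     # Fixed priority ladder over the collected presence table.
--     if "claude" in found:
--         return "claude"
--     if "codex" in found or "gpt" in found:
--         return "codex"
--     if "gemini" in found:
--         return "gemini"
--     if "opencode" in found: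
--         return "opencode"
--     return None
-- ===== Notes on version B (the rewrite author's own statement) =====
-- stated objective: faster
-- what changed: B lowercases each path once and builds a presence set of the five keywords in a single pass, then decides with a separate priority ladder over that set, instead of A's four repeated any-scans that re-lowercase every path per keyword (constant-factor win: one lower() per path instead of up to four).
import Mathlib
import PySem

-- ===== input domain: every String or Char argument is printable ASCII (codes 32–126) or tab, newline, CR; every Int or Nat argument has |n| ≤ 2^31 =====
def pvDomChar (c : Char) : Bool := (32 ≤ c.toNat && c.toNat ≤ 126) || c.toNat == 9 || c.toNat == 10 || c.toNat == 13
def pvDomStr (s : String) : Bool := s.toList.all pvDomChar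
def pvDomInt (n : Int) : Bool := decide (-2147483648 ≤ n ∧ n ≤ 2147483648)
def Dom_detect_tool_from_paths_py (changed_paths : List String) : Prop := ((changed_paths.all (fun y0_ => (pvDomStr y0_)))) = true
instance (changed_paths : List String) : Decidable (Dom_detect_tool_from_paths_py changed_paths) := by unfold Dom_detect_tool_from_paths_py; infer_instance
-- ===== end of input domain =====

-- B builds a presence set of the five keywords in one pass (lowercasing each path once),
-- then applies the priority ladder over that set; A runs four repeated any-scans. Same results.

-- ===== PORT A =====
def detect_tool_from_paths_py (changed_paths : List String) : Option String :=
  if changed_paths.any (fun p => PySem.Str.isIn "claude" (PySem.Str.lower p)) then some "claude"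
  else if changed_paths.any (fun p => PySem.Str.isIn "codex" (PySem.Str.lower p) || PySem.Str.isIn "gpt" (PySem.Str.lower p)) then some "codex"
  else if changed_paths.any (fun p => PySem.Str.isIn "gemini" (PySem.Str.lower p)) then some "gemini"
  else if changed_paths.any (fun p => PySem.Str.isIn "opencode" (PySem.Str.lower p)) then some "opencode"
  else none

-- ===== PORT B =====
def pvKeywords : List String := ["claude", "codex", "gpt", "gemini", "opencode"]

def pvCollect (changed_paths : List String) : PySem.Set String :=
  changed_paths.foldl (fun acc p =>
    let low := PySem.Str.lower p
    pvKeywords.foldl (fun a kw => if PySem.Str.isIn kw low then PySem.Set.add a kw else a) acc)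
    PySem.Set.empty

def detect_tool_from_paths_py_alt (changed_paths : List String) : Option String :=
  let found := pvCollect changed_paths
  if PySem.Set.contains found "claude" then some "claude"
  else if PySem.Set.contains found "codex" || PySem.Set.contains found "gpt" then some "codex"
  else if PySem.Set.contains found "gemini" then some "gemini"
  else if PySem.Set.contains found "opencode" then some "opencode"
  else none

-- ===== PRECONDITION & SPEC =====
def Spec_detect_tool_from_paths_py (changed_paths : List String) (out : Option String) : Prop := out = detect_tool_from_paths_py_alt changed_paths
instance (changed_paths : List String) (out : Option String) : Decidable (Spec_detect_tool_from_paths_py changed_paths out) := by unfold Spec_detect_tool_from_paths_py; infer_instance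

-- ===== CLAIM (what is proved, stated in full; the proofs are below) =====
def Claim_equal_detect_tool_from_paths_py : Prop := ∀ (changed_paths : List String), Dom_detect_tool_from_paths_py changed_paths → Spec_detect_tool_from_paths_py changed_paths (detect_tool_from_paths_py changed_paths)

-- ===== LEMMAS AND PROOFS =====

-- generic: membership in the inner keyword-collection fold
theorem foldl_add_mem (kw low : String) (L : List String) :
    ∀ (a : PySem.Set String),
      kw ∈ L.foldl (fun a k => if PySem.Str.isIn k low then PySem.Set.add a k else a) a
      ↔ kw ∈ a ∨ (kw ∈ L ∧ PySem.Str.isIn kw low = true) := by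
  induction L with
  | nil => simp
  | cons k L' ih =>
    intro a
    rw [List.foldl_cons, ih]
    by_cases h : PySem.Str.isIn k low = true
    · simp only [h, if_pos, PySem.Set.mem_add, List.mem_cons]
      constructor
      · rintro ((hk | rfl) | h2) <;> tauto
      · rintro (hk | ⟨(rfl | hm), hl⟩) <;> tauto
    · simp only [h, Bool.false_eq_true, if_false, List.mem_cons]
      constructor
      · rintro (hk | h2) <;> tauto
      · rintro (hk | ⟨(rfl | hm), hl⟩) <;> tauto

-- membership in the collected set = the keyword occurs in some lowercased path
theorem mem_pvCollect (kw : String) (hkw : kw ∈ pvKeywords) (changed_paths : List String) :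
    (kw ∈ pvCollect changed_paths) ↔ changed_paths.any (fun p => PySem.Str.isIn kw (PySem.Str.lower p)) = true := by
  unfold pvCollect
  suffices h : ∀ (acc : PySem.Set String),
      kw ∈ changed_paths.foldl (fun acc p =>
        pvKeywords.foldl (fun a k => if PySem.Str.isIn k (PySem.Str.lower p) then PySem.Set.add a k else a) acc) acc
      ↔ (kw ∈ acc ∨ changed_paths.any (fun p => PySem.Str.isIn kw (PySem.Str.lower p)) = true) by
    simpa [PySem.Set.empty] using h PySem.Set.empty
  induction changed_paths with
  | nil => simp
  | cons p rest ih =>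
    intro acc
    rw [List.foldl_cons, List.any_cons, ih, foldl_add_mem]
    have : kw ∈ pvKeywords := hkw
    simp only [Bool.or_eq_true]
    tauto

theorem contains_pvCollect (kw : String) (hkw : kw ∈ pvKeywords) (changed_paths : List String) :
    PySem.Set.contains (pvCollect changed_paths) kw
      = changed_paths.any (fun p => PySem.Str.isIn kw (PySem.Str.lower p)) := by
  rw [Bool.eq_iff_iff, PySem.Set.contains_iff]
  exact mem_pvCollect kw hkw changed_paths

theorem any_or_split (l : List String) (f g : String → Bool) :
    l.any (fun p => f p || g p) = (l.any f || l.any g) := by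
  induction l with
  | nil => rfl
  | cons x xs ih => simp [List.any_cons, ih, Bool.or_assoc, Bool.or_left_comm]

-- ===== VERDICT (by name: the statement is the Claim_ definition above) =====
theorem detect_tool_from_paths_py_spec : Claim_equal_detect_tool_from_paths_py := by
  intro changed_paths _
  unfold Spec_detect_tool_from_paths_py detect_tool_from_paths_py detect_tool_from_paths_py_alt
  simp only [contains_pvCollect "claude" (by decide), contains_pvCollect "codex" (by decide),
    contains_pvCollect "gpt" (by decide), contains_pvCollect "gemini" (by decide),
    contains_pvCollect "opencode" (by decide), any_or_split]
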